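-- pv_equiv track=rewrite | github.com/ravish-oo/arc-agi-opoch | present.py | _d8_canonical
-- ===== SOURCE A (Python) =====
-- from typing import List, Tuple, Dict, Set, Optional
--
-- def _d8_canonical(patch: Tuple) -> Tuple:
--     """
--     Apply all D8 transformations and return lex-min.
--
--     D8 = {identity, rot90, rot180, rot270, flip_h, flip_v, flip_d1, flip_d2}
--
--     Args:
--         patch: Tuple representation of patch
--
--     Returns:
--         Lex-min transformation
--     """
--     if not patch:
--         return ()
--
--     # Convert to list for transformations
--     patch_list = [list(row) for row in patch]
--
--     transformations = [
--         patch_list,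
--         _rotate_90(patch_list),
--         _rotate_180(patch_list),
--         _rotate_270(patch_list),
--         _flip_horizontal(patch_list),
--         _flip_vertical(patch_list),
--         _flip_diagonal_main(patch_list),
--         _flip_diagonal_anti(patch_list),
--     ]
--
--     # Convert to tuples and pick lex-min
--     as_tuples = [tuple(tuple(row) for row in t) for t in transformations]
--     return min(as_tuples)
--
-- def _rotate_90(patch: List[List[int]]) -> List[List[int]]:
--     """Rotate patch 90 degrees clockwise."""
--     n = len(patch)
--     m = len(patch[0]) if n > 0 else 0
--     rotated = [[0 for _ in range(n)] for _ in range(m)]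
--
--     for r in range(n):
--         for c in range(m):
--             rotated[c][n - 1 - r] = patch[r][c]
--
--     return rotated
--
-- def _rotate_180(patch: List[List[int]]) -> List[List[int]]:
--     """Rotate patch 180 degrees."""
--     return _rotate_90(_rotate_90(patch))
--
-- def _rotate_270(patch: List[List[int]]) -> List[List[int]]:
--     """Rotate patch 270 degrees clockwise."""
--     n = len(patch)
--     m = len(patch[0]) if n > 0 else 0
--     rotated = [[0 for _ in range(n)] for _ in range(m)]
--
--     for r in range(n):
--         for c in range(m):
--             rotated[m - 1 - c][r] = patch[r][c]
--
--     return rotated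
--
-- def _flip_horizontal(patch: List[List[int]]) -> List[List[int]]:
--     """Flip patch horizontally (left-right)."""
--     return [row[::-1] for row in patch]
--
-- def _flip_vertical(patch: List[List[int]]) -> List[List[int]]:
--     """Flip patch vertically (up-down)."""
--     return patch[::-1]
--
-- def _flip_diagonal_main(patch: List[List[int]]) -> List[List[int]]:
--     """Flip along main diagonal (top-left to bottom-right)."""
--     n = len(patch)
--     m = len(patch[0]) if n > 0 else 0
--     flipped = [[0 for _ in range(n)] for _ in range(m)]
--
--     for r in range(n):
--         for c in range(m):
--             flipped[c][r] = patch[r][c]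
--
--     return flipped
--
-- def _flip_diagonal_anti(patch: List[List[int]]) -> List[List[int]]:
--     """Flip along anti-diagonal (top-right to bottom-left)."""
--     return _rotate_90(_flip_horizontal(patch))
-- ===== SOURCE B (Python) =====
-- from typing import List, Tuple, Dict, Set, Optional
--
-- def _d8_canonical(patch: Tuple) -> Tuple:
--     """Lex-min over D8 without materializing the 8 transforms: each symmetry is
--     a coordinate map; a streaming elimination over cells drops non-minimal
--     symmetries early, and only the winner of each shape class is materialized."""
--     if not patch:
--         return ()
--     g = [list(row) for row in patch]
--     n = len(g)
--     m = len(g[0])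
--
--     def val(k, i, j):
--         # entry (i, j) of transform k, read straight from g via an index map
--         if k == 0:
--             return g[i][j]                      # identity        (n x m)
--         if k == 1:
--             return g[n - 1 - j][i]              # rot90           (m x n)
--         if k == 2:
--             return g[n - 1 - i][m - 1 - j]      # rot180          (n x m)
--         if k == 3:
--             return g[j][m - 1 - i]              # rot270          (m x n)
--         if k == 4:
--             return g[i][m - 1 - j]              # flip horizontal (n x m)
--         if k == 5:
--             return g[n - 1 - i][j]              # flip vertical   (n x m)
--         if k == 6:
--             return g[j][i]                      # main diagonal   (m x n)
--         return g[n - 1 - j][m - 1 - i]          # anti diagonal   (m x n)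
--
--     def elim(ks, rows, cols):
--         # scan cells row-major; keep only symmetries minimal so far
--         cand = ks
--         for i in range(rows):
--             for j in range(cols):
--                 if len(cand) == 1:
--                     break
--                 best = min(val(k, i, j) for k in cand)
--                 cand = [k for k in cand if val(k, i, j) == best]
--         return cand[0]
--
--     k1 = elim([0, 2, 4, 5], n, m)
--     k2 = elim([1, 3, 6, 7], m, n)
--     t1 = tuple(tuple(val(k1, i, j) for j in range(m)) for i in range(n))
--     t2 = tuple(tuple(val(k2, i, j) for j in range(n)) for i in range(m))
--     return t2 if t2 < t1 else t1
-- ===== Notes on version B (the rewrite author's own statement) =====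
-- stated objective: faster
-- what changed: A materializes all eight D8-transformed grids and takes min over the eight tuples; B never builds them: each symmetry is a coordinate map (i,j)->g[..][..], a streaming row-major elimination drops symmetries as soon as a cell differs (usually after one cell), and only the single surviving symmetry of each shape class is materialized, then the two winners compared.
-- outside the precondition, e.g. on _d8_canonical(((1,), (2, 3))): A returns ((1,), (2, 3)), B returns ((1,), (2,)); on _d8_canonical(((1, 2), (3,))): A raises IndexError, B raises IndexError
import Mathlib
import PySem

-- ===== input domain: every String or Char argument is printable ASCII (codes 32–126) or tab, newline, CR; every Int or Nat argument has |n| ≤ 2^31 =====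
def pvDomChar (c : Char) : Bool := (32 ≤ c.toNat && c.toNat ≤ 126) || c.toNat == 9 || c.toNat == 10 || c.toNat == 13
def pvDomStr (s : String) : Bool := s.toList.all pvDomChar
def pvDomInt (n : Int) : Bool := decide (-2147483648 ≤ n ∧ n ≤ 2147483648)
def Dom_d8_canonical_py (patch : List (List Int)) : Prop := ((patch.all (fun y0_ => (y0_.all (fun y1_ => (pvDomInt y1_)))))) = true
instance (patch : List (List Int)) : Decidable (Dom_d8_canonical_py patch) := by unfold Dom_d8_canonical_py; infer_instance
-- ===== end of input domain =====

-- B never materializes the eight D8 transforms: each symmetry is a coordinate map into the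
-- original grid, a streaming row-major elimination drops non-minimal symmetries cell by cell,
-- and only the surviving symmetry of each shape class is materialized (measured faster).

-- ===== PORT A =====
-- len(patch[0]) if len(patch) > 0 else 0
def pvRowLen0 (g : List (List Int)) : Nat := match g with | [] => 0 | r :: _ => r.length

-- _rotate_90: preallocated m×n zero matrix, then rotated[c][n-1-r] = patch[r][c]
def pvRotate90A (g : List (List Int)) : List (List Int) :=
  let n := g.length
  let m := pvRowLen0 g
  let rotated := List.replicate m (List.replicate n (0 : Int))
  (List.range n).foldl (fun rot r =>
    (List.range m).foldl (fun rot c =>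
      rot.modify c (fun row => row.modify (n - 1 - r) (fun _ => (g.getD r []).getD c 0))) rot) rotated

def pvRotate180A (g : List (List Int)) : List (List Int) := pvRotate90A (pvRotate90A g)

-- _rotate_270: rotated[m-1-c][r] = patch[r][c]
def pvRotate270A (g : List (List Int)) : List (List Int) :=
  let n := g.length
  let m := pvRowLen0 g
  let rotated := List.replicate m (List.replicate n (0 : Int))
  (List.range n).foldl (fun rot r =>
    (List.range m).foldl (fun rot c =>
      rot.modify (m - 1 - c) (fun row => row.modify r (fun _ => (g.getD r []).getD c 0))) rot) rotated

-- _flip_horizontal: row[::-1] for each row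
def pvFlipHA (g : List (List Int)) : List (List Int) := g.map (fun row => row.reverse)

-- _flip_vertical: patch[::-1]
def pvFlipVA (g : List (List Int)) : List (List Int) := g.reverse

-- _flip_diagonal_main: flipped[c][r] = patch[r][c]
def pvFlipDiagMainA (g : List (List Int)) : List (List Int) :=
  let n := g.length
  let m := pvRowLen0 g
  let flipped := List.replicate m (List.replicate n (0 : Int))
  (List.range n).foldl (fun fl r =>
    (List.range m).foldl (fun fl c =>
      fl.modify c (fun row => row.modify r (fun _ => (g.getD r []).getD c 0))) fl) flipped

def pvFlipDiagAntiA (g : List (List Int)) : List (List Int) := pvRotate90A (pvFlipHA g)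

-- min(iterable) for a nonempty list: first element, updated whenever a later one is strictly smaller
def pvPyMin (x : List (List Int)) (xs : List (List (List Int))) : List (List Int) :=
  xs.foldl (fun b t => if t < b then t else b) x

def d8_canonical_py (patch : List (List Int)) : List (List Int) :=
  if patch = [] then []
  else
    pvPyMin patch
      [pvRotate90A patch, pvRotate180A patch, pvRotate270A patch,
       pvFlipHA patch, pvFlipVA patch, pvFlipDiagMainA patch, pvFlipDiagAntiA patch]

-- ===== PORT B =====
-- val(k, i, j): entry (i,j) of transform k, read via a coordinate map.
-- Indices use getD: under Pre_ (rectangular grid) every access B performs is in range,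
-- exactly as in the Python.
def pvValB (g : List (List Int)) (n m : Nat) (k i j : Nat) : Int :=
  if k = 0 then (g.getD i []).getD j 0
  else if k = 1 then (g.getD (n - 1 - j) []).getD i 0
  else if k = 2 then (g.getD (n - 1 - i) []).getD (m - 1 - j) 0
  else if k = 3 then (g.getD j []).getD (m - 1 - i) 0
  else if k = 4 then (g.getD i []).getD (m - 1 - j) 0
  else if k = 5 then (g.getD (n - 1 - i) []).getD j 0
  else if k = 6 then (g.getD j []).getD i 0
  else (g.getD (n - 1 - j) []).getD (m - 1 - i) 0

-- min(...) over a nonempty sequence of ints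
def pvMinInt (x : Int) (xs : List Int) : Int := xs.foldl (fun b t => if t < b then t else b) x

-- one cell of elim's inner loop: once cand is a singleton the break keeps it unchanged;
-- otherwise keep exactly the candidates attaining the minimal value at this cell
def pvElimCell (g : List (List Int)) (n m i j : Nat) (cand : List Nat) : List Nat :=
  if cand.length = 1 then cand
  else
    match cand with
    | [] => []  -- unreachable (Python min() would raise on an empty cand; cand stays nonempty)
    | k0 :: rest =>
      let b := pvMinInt (pvValB g n m k0 i j) (rest.map (fun k => pvValB g n m k i j))
      (k0 :: rest).filter (fun k => pvValB g n m k i j == b)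

-- elim(ks, rows, cols): row-major scan; cand[0] at the end (cand provably nonempty)
def pvElim (g : List (List Int)) (n m : Nat) (ks : List Nat) (rows cols : Nat) : Nat :=
  ((List.range rows).foldl (fun cand i =>
      (List.range cols).foldl (fun cand j => pvElimCell g n m i j cand) cand) ks).headD 0

def d8_canonical_py_alt (patch : List (List Int)) : List (List Int) :=
  if patch = [] then []
  else
    let n := patch.length
    let m := pvRowLen0 patch
    let k1 := pvElim patch n m [0, 2, 4, 5] n m
    let k2 := pvElim patch n m [1, 3, 6, 7] m n
    let t1 := (List.range n).map (fun i => (List.range m).map (fun j => pvValB patch n m k1 i j))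
    let t2 := (List.range m).map (fun i => (List.range n).map (fun j => pvValB patch n m k2 i j))
    if t2 < t1 then t2 else t1

-- ===== PRECONDITION & SPEC =====
-- Pre_ excludes non-rectangular patches (malformed input for a grid symmetry): a row shorter
-- than the first makes A raise IndexError, and on other ragged patches A's value mixes
-- rotations truncated to len(patch[0]) columns with full-row flips, an artefact of its index
-- loops; B naturally raises or differs there.
def Pre_d8_canonical_py (patch : List (List Int)) : Prop :=
  ∀ row ∈ patch, row.length = pvRowLen0 patch
instance (patch : List (List Int)) : Decidable (Pre_d8_canonical_py patch) := by unfold Pre_d8_canonical_py; infer_instance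

def pvWitness_d8_canonical_py : List (List Int) := [[1, 2], [3, 4]]

def Spec_d8_canonical_py (patch : List (List Int)) (out : List (List Int)) : Prop := out = d8_canonical_py_alt patch
instance (patch : List (List Int)) (out : List (List Int)) : Decidable (Spec_d8_canonical_py patch out) := by unfold Spec_d8_canonical_py; infer_instance

-- ===== CLAIM (what is proved, stated in full; the proofs are below) =====
def Claim_equal_d8_canonical_py : Prop := ∀ (patch : List (List Int)), Dom_d8_canonical_py patch → Pre_d8_canonical_py patch → Spec_d8_canonical_py patch (d8_canonical_py patch)

-- ===== LEMMAS AND PROOFS =====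

-- grid with n rows and m columns whose (i,j) entry is f i j
def pvMk (n m : Nat) (f : Nat → Nat → Int) : List (List Int) :=
  (List.range n).map (fun i => (List.range m).map (fun j => f i j))

theorem pvMap_range_getElem? (n i : Nat) (f : Nat → Int) :
    ((List.range n).map f)[i]? = if i < n then some (f i) else none := by
  split <;> simp_all

theorem pvMk_getElem? (n m : Nat) (f : Nat → Nat → Int) (i : Nat) :
    (pvMk n m f)[i]? = if i < n then some ((List.range m).map (f i)) else none := by
  unfold pvMk
  split <;> simp_all

theorem pvModify_getElem? {α : Type} (l : List α) (i : Nat) (f : α → α) (j : Nat) :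
    (l.modify i f)[j]? = if i = j then l[j]?.map f else l[j]? := by
  simp only [List.getElem?_modify]
  split
  · subst ‹i = j›; rfl
  · cases l[j]? <;> simp_all

-- fold of per-index modifies, forward order: position i is written once, by step i
theorem pvFoldl_modify_fwd {α : Type} (k : Nat) (h : Nat → α → α) (l : List α) (i : Nat) :
    ((List.range k).foldl (fun a c => a.modify c (h c)) l)[i]? =
      if i < k then l[i]?.map (h i) else l[i]? := by
  induction k with
  | zero => simp
  | succ k ih =>
    rw [List.range_succ, List.foldl_append]
    simp only [List.foldl_cons, List.foldl_nil, pvModify_getElem?]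
    by_cases hik : k = i
    · subst hik
      simp [ih]
    · rw [if_neg hik, ih]
      by_cases h1 : i < k
      · rw [if_pos h1, if_pos (Nat.lt_succ_of_lt h1)]
      · rw [if_neg h1, if_neg (by omega)]

-- fold of per-index modifies at positions M-1-c, c < k ≤ M: position i is written by step M-1-i
theorem pvFoldl_modify_bwd {α : Type} (M : Nat) (h : Nat → α → α) (l : List α) (i : Nat) :
    ∀ k ≤ M, ((List.range k).foldl (fun a c => a.modify (M - 1 - c) (h c)) l)[i]? =
      if M - k ≤ i ∧ i < M then l[i]?.map (h (M - 1 - i)) else l[i]? := by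
  intro k
  induction k with
  | zero => intro _; simp only [List.range_zero, List.foldl_nil]; rw [if_neg (by omega)]
  | succ k ih =>
    intro hkM
    rw [List.range_succ, List.foldl_append]
    simp only [List.foldl_cons, List.foldl_nil, pvModify_getElem?]
    rw [ih (by omega)]
    by_cases he : M - 1 - k = i
    · rw [if_pos he, if_neg (by omega), if_pos (by omega)]
      have : M - 1 - i = k := by omega
      rw [this]
    · rw [if_neg he]
      by_cases h1 : M - k ≤ i ∧ i < M
      · rw [if_pos h1, if_pos (by omega)]
      · rw [if_neg h1, if_neg (by omega)]

-- a fold whose every step acts on entry i by u r commutes with taking entry i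
theorem pvFoldl_entry {β γ : Type} (rs : List γ) (G : List β → γ → List β) (u : γ → β → β) (i : Nat)
    (h : ∀ a r, r ∈ rs → (G a r)[i]? = a[i]?.map (u r)) (X : List β) :
    (rs.foldl G X)[i]? = X[i]?.map (fun b => rs.foldl (fun b r => u r b) b) := by
  induction rs generalizing X with
  | nil => simp
  | cons r rs ih =>
    simp only [List.foldl_cons]
    rw [ih (fun a r' hr' => h a r' (List.mem_cons_of_mem _ hr')),
        h X r (List.mem_cons_self ..)]
    cases X[i]? <;> rfl

theorem pvReplicate_getElem? {α : Type} (n : Nat) (x : α) (i : Nat) :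
    (List.replicate n x)[i]? = if i < n then some x else none := by
  simp [List.getElem?_replicate]

theorem pvMk_getD (n m : Nat) (f : Nat → Nat → Int) (r c : Nat) (hr : r < n) (hc : c < m) :
    ((pvMk n m f).getD r []).getD c 0 = f r c := by
  have h1 : (pvMk n m f).getD r [] = (List.range m).map (f r) := by
    rw [List.getD_eq_getElem?_getD, pvMk_getElem?, if_pos hr]; rfl
  rw [h1, List.getD_eq_getElem?_getD, pvMap_range_getElem?, if_pos hc]; rfl

theorem pvRowLen0_mk (n m : Nat) (f : Nat → Nat → Int) (hn : 0 < n) :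
    pvRowLen0 (pvMk n m f) = m := by
  unfold pvMk
  obtain ⟨n', rfl⟩ : ∃ n', n = n' + 1 := ⟨n - 1, by omega⟩
  rw [List.range_succ_eq_map]
  simp [pvRowLen0]

theorem pvLength_mk (n m : Nat) (f : Nat → Nat → Int) : (pvMk n m f).length = n := by
  simp [pvMk]

-- entry (i,j) of A's double-loop builders, in closed form
theorem pvRotate90A_mk (n m : Nat) (f : Nat → Nat → Int) (hn : 0 < n) :
    pvRotate90A (pvMk n m f) = pvMk m n (fun i j => f (n - 1 - j) i) := by
  unfold pvRotate90A
  rw [pvRowLen0_mk n m f hn, pvLength_mk]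
  refine List.ext_getElem? (fun i => ?_)
  by_cases him : i < m
  · rw [pvFoldl_entry (List.range n) _
        (fun r row => row.modify (n - 1 - r) (fun _ => ((pvMk n m f).getD r []).getD i 0)) i
        (fun a r _ => by rw [pvFoldl_modify_fwd, if_pos him]) _]
    rw [pvReplicate_getElem?, if_pos him, pvMk_getElem?, if_pos him]
    simp only [Option.map_some]
    congr 1
    refine List.ext_getElem? (fun j => ?_)
    rw [pvFoldl_modify_bwd n _ _ j n (le_refl n), pvMap_range_getElem?]
    by_cases hjn : j < n
    · rw [if_pos (by omega), if_pos hjn, pvReplicate_getElem?, if_pos hjn]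
      simp only [Option.map_some]
      rw [pvMk_getD n m f (n - 1 - j) i (by omega) him]
    · rw [if_neg (by omega), if_neg hjn, pvReplicate_getElem?, if_neg hjn]
  · rw [pvFoldl_entry (List.range n) _ (fun _ row => row) i
        (fun a r _ => by
          rw [pvFoldl_modify_fwd, if_neg him]; cases a[i]? <;> rfl) _]
    rw [pvReplicate_getElem?, if_neg him, pvMk_getElem?, if_neg him]
    rfl

theorem pvRotate270A_mk (n m : Nat) (f : Nat → Nat → Int) (hn : 0 < n) :
    pvRotate270A (pvMk n m f) = pvMk m n (fun i j => f j (m - 1 - i)) := by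
  unfold pvRotate270A
  rw [pvRowLen0_mk n m f hn, pvLength_mk]
  refine List.ext_getElem? (fun i => ?_)
  by_cases him : i < m
  · rw [pvFoldl_entry (List.range n) _
        (fun r row => row.modify r (fun _ => ((pvMk n m f).getD r []).getD (m - 1 - i) 0)) i
        (fun a r _ => by
          rw [pvFoldl_modify_bwd m _ _ i m (le_refl m), if_pos (by omega)]) _]
    rw [pvReplicate_getElem?, if_pos him, pvMk_getElem?, if_pos him]
    simp only [Option.map_some]
    congr 1
    refine List.ext_getElem? (fun j => ?_)
    rw [pvFoldl_modify_fwd, pvMap_range_getElem?]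
    by_cases hjn : j < n
    · rw [if_pos hjn, if_pos hjn, pvReplicate_getElem?, if_pos hjn]
      simp only [Option.map_some]
      rw [pvMk_getD n m f j (m - 1 - i) hjn (by omega)]
    · rw [if_neg hjn, if_neg hjn, pvReplicate_getElem?, if_neg hjn]
  · rw [pvFoldl_entry (List.range n) _ (fun _ row => row) i
        (fun a r _ => by
          rw [pvFoldl_modify_bwd m _ _ i m (le_refl m), if_neg (by omega)]
          cases a[i]? <;> rfl) _]
    rw [pvReplicate_getElem?, if_neg him, pvMk_getElem?, if_neg him]
    rfl

theorem pvFlipDiagMainA_mk (n m : Nat) (f : Nat → Nat → Int) (hn : 0 < n) :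
    pvFlipDiagMainA (pvMk n m f) = pvMk m n (fun i j => f j i) := by
  unfold pvFlipDiagMainA
  rw [pvRowLen0_mk n m f hn, pvLength_mk]
  refine List.ext_getElem? (fun i => ?_)
  by_cases him : i < m
  · rw [pvFoldl_entry (List.range n) _
        (fun r row => row.modify r (fun _ => ((pvMk n m f).getD r []).getD i 0)) i
        (fun a r _ => by rw [pvFoldl_modify_fwd, if_pos him]) _]
    rw [pvReplicate_getElem?, if_pos him, pvMk_getElem?, if_pos him]
    simp only [Option.map_some]
    congr 1
    refine List.ext_getElem? (fun j => ?_)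
    rw [pvFoldl_modify_fwd, pvMap_range_getElem?]
    by_cases hjn : j < n
    · rw [if_pos hjn, if_pos hjn, pvReplicate_getElem?, if_pos hjn]
      simp only [Option.map_some]
      rw [pvMk_getD n m f j i hjn him]
    · rw [if_neg hjn, if_neg hjn, pvReplicate_getElem?, if_neg hjn]
  · rw [pvFoldl_entry (List.range n) _ (fun _ row => row) i
        (fun a r _ => by
          rw [pvFoldl_modify_fwd, if_neg him]; cases a[i]? <;> rfl) _]
    rw [pvReplicate_getElem?, if_neg him, pvMk_getElem?, if_neg him]
    rfl

theorem pvReverse_mk (n m : Nat) (f : Nat → Nat → Int) :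
    (pvMk n m f).reverse = pvMk n m (fun i j => f (n - 1 - i) j) := by
  refine List.ext_getElem? (fun i => ?_)
  rw [pvMk_getElem?]
  by_cases hin : i < n
  · rw [List.getElem?_reverse (by simpa [pvLength_mk] using hin), pvLength_mk,
        pvMk_getElem?, if_pos (by omega), if_pos hin]
  · rw [if_neg hin, List.getElem?_eq_none (by simp [pvLength_mk]; omega)]

theorem pvRowReverse_map_range (m : Nat) (f : Nat → Int) :
    ((List.range m).map f).reverse = (List.range m).map (fun j => f (m - 1 - j)) := by
  refine List.ext_getElem? (fun j => ?_)
  rw [pvMap_range_getElem?]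
  by_cases hj : j < m
  · rw [List.getElem?_reverse (by simpa using hj), List.length_map, List.length_range,
        pvMap_range_getElem?, if_pos (by omega), if_pos hj]
  · rw [if_neg hj, List.getElem?_eq_none (by simp; omega)]

theorem pvFlipHA_mk (n m : Nat) (f : Nat → Nat → Int) :
    pvFlipHA (pvMk n m f) = pvMk n m (fun i j => f i (m - 1 - j)) := by
  unfold pvFlipHA pvMk
  rw [List.map_map]
  exact List.map_congr_left (fun i _ => pvRowReverse_map_range m (f i))

-- rectangular decomposition
theorem pvRect_decomp (patch : List (List Int)) (h : Pre_d8_canonical_py patch) :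
    patch = pvMk patch.length (pvRowLen0 patch) (fun i j => (patch.getD i []).getD j 0) := by
  refine List.ext_getElem? (fun i => ?_)
  rw [pvMk_getElem?]
  by_cases hi : i < patch.length
  · rw [if_pos hi, List.getElem?_eq_getElem hi]
    congr 1
    refine List.ext_getElem? (fun j => ?_)
    have hlen : patch[i].length = pvRowLen0 patch := h patch[i] (List.getElem_mem hi)
    rw [pvMap_range_getElem?]
    have hrow : patch.getD i [] = patch[i] := by
      simp [List.getD_eq_getElem?_getD, List.getElem?_eq_getElem hi]
    by_cases hj : j < pvRowLen0 patch
    · rw [if_pos hj, List.getElem?_eq_getElem (by omega), hrow,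
          List.getD_eq_getElem?_getD, List.getElem?_eq_getElem (by omega)]
      rfl
    · rw [if_neg hj, List.getElem?_eq_none (by omega)]
  · rw [if_neg hi, List.getElem?_eq_none (by omega)]

-- min-fold facts, for pvPyMin (grids) and pvMinInt (ints)
theorem pvPyMin_mem (x : List (List Int)) (xs : List (List (List Int))) :
    pvPyMin x xs ∈ x :: xs := by
  unfold pvPyMin
  induction xs generalizing x with
  | nil => simp
  | cons y ys ih =>
    simp only [List.foldl_cons]
    by_cases hc : y < x
    · rw [if_pos hc]
      exact List.mem_cons_of_mem _ (ih y)
    · rw [if_neg hc]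
      rcases List.mem_cons.1 (ih x) with h | h
      · rw [h]; exact List.mem_cons_self ..
      · exact List.mem_cons_of_mem _ (List.mem_cons_of_mem _ h)

theorem pvPyMin_le_head (x : List (List Int)) (xs : List (List (List Int))) :
    pvPyMin x xs ≤ x := by
  unfold pvPyMin
  induction xs generalizing x with
  | nil => exact le_refl x
  | cons y ys ih =>
    simp only [List.foldl_cons]
    refine le_trans (ih _) ?_
    split
    · exact le_of_lt ‹y < x›
    · exact le_refl x

theorem pvPyMin_le (x : List (List Int)) (xs : List (List (List Int))) :
    ∀ t ∈ x :: xs, pvPyMin x xs ≤ t := by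
  induction xs generalizing x with
  | nil =>
    intro t ht
    rcases List.mem_cons.1 ht with rfl | h
    · exact pvPyMin_le_head t []
    · exact absurd h (List.not_mem_nil)
  | cons y ys ih =>
    intro t ht
    have hstep : pvPyMin x (y :: ys) = pvPyMin (if y < x then y else x) ys := rfl
    rcases List.mem_cons.1 ht with rfl | ht'
    · exact pvPyMin_le_head t (y :: ys)
    · rcases List.mem_cons.1 ht' with rfl | ht''
      · rw [hstep]
        refine le_trans (pvPyMin_le_head _ ys) ?_
        split
        · exact le_refl t
        · exact le_of_not_gt ‹¬ t < x›
      · rw [hstep]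
        exact ih _ t (List.mem_cons_of_mem _ ht'')

theorem pvMinInt_mem (x : Int) (xs : List Int) : pvMinInt x xs ∈ x :: xs := by
  unfold pvMinInt
  induction xs generalizing x with
  | nil => simp
  | cons y ys ih =>
    simp only [List.foldl_cons]
    by_cases hc : y < x
    · rw [if_pos hc]
      exact List.mem_cons_of_mem _ (ih y)
    · rw [if_neg hc]
      rcases List.mem_cons.1 (ih x) with h | h
      · rw [h]; exact List.mem_cons_self ..
      · exact List.mem_cons_of_mem _ (List.mem_cons_of_mem _ h)

theorem pvMinInt_le_head (x : Int) (xs : List Int) : pvMinInt x xs ≤ x := by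
  unfold pvMinInt
  induction xs generalizing x with
  | nil => exact le_refl x
  | cons y ys ih =>
    simp only [List.foldl_cons]
    refine le_trans (ih _) ?_
    split
    · exact le_of_lt ‹y < x›
    · exact le_refl x

theorem pvMinInt_le (x : Int) (xs : List Int) : ∀ t ∈ x :: xs, pvMinInt x xs ≤ t := by
  induction xs generalizing x with
  | nil =>
    intro t ht
    rcases List.mem_cons.1 ht with rfl | h
    · exact pvMinInt_le_head t []
    · exact absurd h (List.not_mem_nil)
  | cons y ys ih =>
    intro t ht
    have hstep : pvMinInt x (y :: ys) = pvMinInt (if y < x then y else x) ys := rfl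
    rcases List.mem_cons.1 ht with rfl | ht'
    · exact pvMinInt_le_head t (y :: ys)
    · rcases List.mem_cons.1 ht' with rfl | ht''
      · rw [hstep]
        refine le_trans (pvMinInt_le_head _ ys) ?_
        split
        · exact le_refl t
        · exact le_of_not_gt ‹¬ t < x›
      · rw [hstep]
        exact ih _ t (List.mem_cons_of_mem _ ht'')

-- lexicographic order and append, for equal-length prefixes
theorem pvLtAppend {α : Type} [LinearOrder α] :
    ∀ (a b : List α), a.length = b.length → ∀ (x y : List α),
      (a ++ x < b ++ y ↔ a < b ∨ (a = b ∧ x < y)) := by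
  intro a
  induction a with
  | nil =>
    intro b hb x y
    have : b = [] := by cases b <;> simp_all
    subst this
    simp
  | cons p a' ih =>
    intro b hb x y
    cases b with
    | nil => simp at hb
    | cons q b' =>
      simp only [List.cons_append, List.cons_lt_cons_iff, List.cons.injEq]
      rw [ih b' (by simpa using hb) x y]
      constructor
      · rintro (h | ⟨rfl, h | ⟨rfl, h⟩⟩)
        · exact Or.inl (Or.inl h)
        · exact Or.inl (Or.inr ⟨rfl, h⟩)
        · exact Or.inr ⟨⟨rfl, rfl⟩, h⟩
      · rintro ((h | ⟨rfl, h⟩) | ⟨⟨rfl, rfl⟩, h⟩)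
        · exact Or.inl h
        · exact Or.inr ⟨rfl, Or.inl h⟩
        · exact Or.inr ⟨rfl, Or.inr ⟨rfl, h⟩⟩

theorem pvLtAppend_of_lt {α : Type} [LinearOrder α] {a b : List α} (h : a < b)
    (hl : a.length = b.length) (x y : List α) : a ++ x < b ++ y :=
  (pvLtAppend a b hl x y).2 (Or.inl h)

theorem pvSingleton_lt {α : Type} [LinearOrder α] (a a' : α) : ([a] < [a']) ↔ a < a' := by
  simp only [List.cons_lt_cons_iff]
  constructor
  · rintro (h | ⟨rfl, h⟩)
    · exact h
    · exact absurd h (List.not_lt_nil _)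
  · exact Or.inl

theorem pvAppend_single_lt {α : Type} [LinearOrder α] (p : List α) (a a' : α) :
    (p ++ [a] < p ++ [a']) ↔ a < a' := by
  rw [pvLtAppend p p rfl]
  simp [pvSingleton_lt]

theorem pvAppend_single_le {α : Type} [LinearOrder α] (p : List α) (a a' : α) :
    (p ++ [a] ≤ p ++ [a']) ↔ a ≤ a' := by
  rw [← not_lt, ← not_lt]
  exact not_congr (pvAppend_single_lt p a' a)

-- grid lex order is the lex order of the flattened row-major sequence (equal shapes)
theorem pvFlatLt {α : Type} [LinearOrder α] {rs1 rs2 : List (List α)}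
    (h : List.Forall₂ (fun r s : List α => r.length = s.length) rs1 rs2) :
    rs1 < rs2 ↔ rs1.flatten < rs2.flatten := by
  induction h with
  | nil => simp
  | cons hab hrel ih =>
    rename_i a b as bs
    simp only [List.flatten_cons, List.cons_lt_cons_iff]
    rw [pvLtAppend a b hab, ih]

theorem pvForall2_map {α : Type} (l : List α) (F G : α → List Int)
    (h : ∀ x ∈ l, (F x).length = (G x).length) :
    List.Forall₂ (fun r s : List Int => r.length = s.length) (l.map F) (l.map G) := by
  induction l with
  | nil => simp
  | cons a l ih =>
    simp only [List.map_cons]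
    exact List.Forall₂.cons (h a (List.mem_cons_self ..))
      (ih (fun x hx => h x (List.mem_cons_of_mem _ hx)))

theorem pvForall2_mk (R C : Nat) (F G : Nat → Nat → Int) :
    List.Forall₂ (fun r s : List Int => r.length = s.length) (pvMk R C F) (pvMk R C G) :=
  pvForall2_map (List.range R) _ _ (fun _ _ => by simp)

theorem pvGrid_le_iff (R C : Nat) (F G : Nat → Nat → Int) :
    (pvMk R C F ≤ pvMk R C G) ↔ (pvMk R C F).flatten ≤ (pvMk R C G).flatten := by
  rw [← not_lt, ← not_lt]
  exact not_congr (pvFlatLt (pvForall2_mk R C G F))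

-- cells in row-major order, and B's value sequence along a cell list
def pvCells (R C : Nat) : List (Nat × Nat) :=
  (List.range R).flatMap (fun i => (List.range C).map (fun j => (i, j)))

def pvVseq (g : List (List Int)) (n m : Nat) (cs : List (Nat × Nat)) (k : Nat) : List Int :=
  cs.map (fun c => pvValB g n m k c.1 c.2)

theorem pvVseq_append (g : List (List Int)) (n m : Nat) (cs : List (Nat × Nat))
    (c : Nat × Nat) (k : Nat) :
    pvVseq g n m (cs ++ [c]) k = pvVseq g n m cs k ++ [pvValB g n m k c.1 c.2] := by
  simp [pvVseq]

theorem pvVseq_length (g : List (List Int)) (n m : Nat) (cs : List (Nat × Nat)) (k : Nat) :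
    (pvVseq g n m cs k).length = cs.length := by
  simp [pvVseq]

theorem pvVseq_cells (g : List (List Int)) (n m R C k : Nat) :
    pvVseq g n m (pvCells R C) k = (pvMk R C (fun i j => pvValB g n m k i j)).flatten := by
  simp only [pvVseq, pvCells, pvMk, List.map_flatMap, List.map_map]
  rw [← List.flatMap_def]
  rfl

theorem pvFoldl_flatMap {α β σ : Type} (l : List α) (h : α → List β) (g : σ → β → σ) (s : σ) :
    (l.flatMap h).foldl g s = l.foldl (fun s a => (h a).foldl g s) s := by
  induction l generalizing s with
  | nil => simp
  | cons a l ih => simp [List.flatMap_cons, List.foldl_append, ih]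

theorem pvElimFold_cells (g : List (List Int)) (n m : Nat) (ks : List Nat) (rows cols : Nat) :
    (List.range rows).foldl (fun cand i =>
        (List.range cols).foldl (fun cand j => pvElimCell g n m i j cand) cand) ks
      = (pvCells rows cols).foldl (fun cand c => pvElimCell g n m c.1 c.2 cand) ks := by
  rw [pvCells, pvFoldl_flatMap]
  simp [List.foldl_map]

-- the elimination invariant: candidates are exactly lex-minimal on the scanned prefix
-- (or a singleton that was already strictly minimal)
theorem pvElim_inv (g : List (List Int)) (n m : Nat) (ks : List Nat) (hks : ks ≠ [])
    (cs : List (Nat × Nat)) :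
    (cs.foldl (fun cand c => pvElimCell g n m c.1 c.2 cand) ks) ≠ [] ∧
    (∀ k ∈ cs.foldl (fun cand c => pvElimCell g n m c.1 c.2 cand) ks, k ∈ ks) ∧
    (∀ k ∈ cs.foldl (fun cand c => pvElimCell g n m c.1 c.2 cand) ks, ∀ k' ∈ ks,
        pvVseq g n m cs k ≤ pvVseq g n m cs k') ∧
    (∀ k' ∈ ks, k' ∉ cs.foldl (fun cand c => pvElimCell g n m c.1 c.2 cand) ks →
        ∀ k ∈ cs.foldl (fun cand c => pvElimCell g n m c.1 c.2 cand) ks,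
          pvVseq g n m cs k < pvVseq g n m cs k') := by
  induction cs using List.reverseRecOn with
  | nil =>
    refine ⟨hks, fun k h => h, ?_, ?_⟩
    · intro k _ k' _
      simp [pvVseq]
    · intro k' hk' hnot
      exact absurd hk' hnot
  | append_singleton cs c ih =>
    obtain ⟨hne, hsub, hle, hlt⟩ := ih
    set cand := cs.foldl (fun cand c => pvElimCell g n m c.1 c.2 cand) ks with hcand
    have hfold : (cs ++ [c]).foldl (fun cand c => pvElimCell g n m c.1 c.2 cand) ks
        = pvElimCell g n m c.1 c.2 cand := by
      rw [List.foldl_append]; rfl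
    have hlen2 : ∀ k k', (pvVseq g n m cs k).length = (pvVseq g n m cs k').length := by
      intro k k'; rw [pvVseq_length, pvVseq_length]
    rw [hfold]
    unfold pvElimCell
    by_cases h1 : cand.length = 1
    · rw [if_pos h1]
      obtain ⟨k0, hk0⟩ := List.length_eq_one_iff.1 h1
      refine ⟨hne, hsub, ?_, ?_⟩
      · intro k hk k' hk'
        rw [pvVseq_append, pvVseq_append]
        by_cases hmem : k' ∈ cand
        · have hkk : k = k' := by
            rw [hk0] at hk hmem
            simp only [List.mem_singleton] at hk hmem
            rw [hk, hmem]
          subst hkk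
          exact le_refl _
        · exact le_of_lt (pvLtAppend_of_lt (hlt k' hk' hmem k hk) (hlen2 k k') _ _)
      · intro k' hk' hnot k hk
        rw [pvVseq_append, pvVseq_append]
        exact pvLtAppend_of_lt (hlt k' hk' hnot k hk) (hlen2 k k') _ _
    · rw [if_neg h1]
      match hc : cand with
      | [] => exact absurd hc hne
      | k0 :: rest =>
        simp only []
        set b := pvMinInt (pvValB g n m k0 c.1 c.2)
            (rest.map (fun k => pvValB g n m k c.1 c.2)) with hb
        -- b is attained by some candidate and is ≤ every candidate's value
        have hble : ∀ k ∈ k0 :: rest, b ≤ pvValB g n m k c.1 c.2 := by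
          intro k hk
          rcases List.mem_cons.1 hk with rfl | hk'
          · exact pvMinInt_le _ _ _ (List.mem_cons_self ..)
          · exact pvMinInt_le _ _ _ (List.mem_cons_of_mem _ (List.mem_map_of_mem hk'))
        have hbmem : ∃ kb ∈ k0 :: rest, pvValB g n m kb c.1 c.2 = b := by
          rcases List.mem_cons.1 (pvMinInt_mem (pvValB g n m k0 c.1 c.2)
              (rest.map (fun k => pvValB g n m k c.1 c.2))) with h | h
          · exact ⟨k0, List.mem_cons_self .., h.symm⟩
          · obtain ⟨kb, hkb, hv⟩ := List.mem_map.1 h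
            exact ⟨kb, List.mem_cons_of_mem _ hkb, hv⟩
        have hmemfilter : ∀ k, k ∈ (k0 :: rest).filter (fun k => pvValB g n m k c.1 c.2 == b) ↔
            (k ∈ k0 :: rest ∧ pvValB g n m k c.1 c.2 = b) := by
          intro k
          rw [List.mem_filter]
          simp [beq_iff_eq]
        -- the prefixes of two surviving candidates are equal
        have hprefeq : ∀ k ∈ k0 :: rest, ∀ k' ∈ k0 :: rest,
            pvVseq g n m cs k = pvVseq g n m cs k' := by
          intro k hk k' hk'
          rw [← hc] at hk hk'
          exact le_antisymm (hle k hk k' (hsub k' hk')) (hle k' hk' k (hsub k hk))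
        obtain ⟨kb, hkbmem, hkbval⟩ := hbmem
        refine ⟨?_, ?_, ?_, ?_⟩
        · exact List.ne_nil_of_mem ((hmemfilter kb).2 ⟨hkbmem, hkbval⟩)
        · intro k hk
          exact hsub k (hc ▸ ((hmemfilter k).1 hk).1)
        · intro k hk k' hk'
          obtain ⟨hkc, hkv⟩ := (hmemfilter k).1 hk
          have hkcand : k ∈ cand := hc ▸ hkc
          rw [pvVseq_append, pvVseq_append]
          rcases lt_or_eq_of_le (hle k hkcand k' hk') with hstrict | heq
          · exact le_of_lt (pvLtAppend_of_lt hstrict (hlen2 k k') _ _)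
          · have hk'cand : k' ∈ cand := by
              by_contra hnot
              exact absurd heq (ne_of_lt (hlt k' hk' hnot k hkcand))
            rw [heq, pvAppend_single_le, hkv]
            exact hble k' (hc ▸ hk'cand)
        · intro k' hk' hnot k hk
          obtain ⟨hkc, hkv⟩ := (hmemfilter k).1 hk
          have hkcand : k ∈ cand := hc ▸ hkc
          rw [pvVseq_append, pvVseq_append]
          by_cases hk'cand : k' ∈ cand
          · have hfiltered : ¬ pvValB g n m k' c.1 c.2 = b := by
              intro hcontra
              exact hnot ((hmemfilter k').2 ⟨hc ▸ hk'cand, hcontra⟩)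
            have hgt : b < pvValB g n m k' c.1 c.2 :=
              lt_of_le_of_ne (hble k' (hc ▸ hk'cand)) (fun h => hfiltered h.symm)
            rw [hprefeq k hkc k' (hc ▸ hk'cand), pvAppend_single_lt, hkv]
            exact hgt
          · exact pvLtAppend_of_lt (hlt k' hk' hk'cand k hkcand) (hlen2 k k') _ _

-- elim's result: a member of ks whose grid is lex-least among the group's grids
theorem pvElim_spec (g : List (List Int)) (n m : Nat) (ks : List Nat) (rows cols : Nat)
    (hks : ks ≠ []) :
    pvElim g n m ks rows cols ∈ ks ∧
    ∀ k' ∈ ks, pvMk rows cols (fun i j => pvValB g n m (pvElim g n m ks rows cols) i j)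
        ≤ pvMk rows cols (fun i j => pvValB g n m k' i j) := by
  obtain ⟨hne, hsub, hle, _⟩ := pvElim_inv g n m ks hks (pvCells rows cols)
  unfold pvElim
  rw [pvElimFold_cells]
  set cand := (pvCells rows cols).foldl (fun cand c => pvElimCell g n m c.1 c.2 cand) ks with hcand
  obtain ⟨k0, t, hc⟩ := List.exists_cons_of_ne_nil hne
  rw [hc]
  simp only [List.headD_cons]
  have hk0 : k0 ∈ cand := by rw [hc]; exact List.mem_cons_self ..
  refine ⟨hsub k0 hk0, fun k' hk' => ?_⟩
  rw [pvGrid_le_iff, ← pvVseq_cells, ← pvVseq_cells]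
  exact hle k0 hk0 k' hk'

-- a fold that never changes its state
theorem pvFoldl_id {α σ : Type} (l : List α) (s : σ) : l.foldl (fun s _ => s) s = s := by
  induction l generalizing s with
  | nil => rfl
  | cons a l ih => simp [ih]

-- degenerate helpers for the all-rows-empty case
theorem pvRotate90A_of_rowLen0_zero (g : List (List Int)) (h : pvRowLen0 g = 0) :
    pvRotate90A g = [] := by
  unfold pvRotate90A
  rw [h]
  simp

theorem pvPyMin_nil_of_mem (x : List (List Int)) (xs : List (List (List Int)))
    (hmem : ([] : List (List Int)) ∈ x :: xs) : pvPyMin x xs = [] :=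
  le_antisymm (pvPyMin_le x xs [] hmem) (le_of_not_gt (List.not_lt_nil _))

theorem pvAlt_mzero (patch : List (List Int)) (hp : ¬ patch = [])
    (hm : pvRowLen0 patch = 0) : d8_canonical_py_alt patch = [] := by
  rw [d8_canonical_py_alt, if_neg hp, hm]
  simp only [pvElim, List.range_zero, List.foldl_nil, List.map_nil, pvFoldl_id]
  have hn : ∃ n', patch.length = n' + 1 := by
    cases patch with
    | nil => exact absurd rfl hp
    | cons a l => exact ⟨l.length, rfl⟩
  obtain ⟨n', hn'⟩ := hn
  rw [hn', if_pos]
  rw [List.range_succ_eq_map, List.map_cons]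
  exact List.nil_lt_cons ..

theorem pvA_unfold (patch : List (List Int)) (h : ¬ patch = []) :
    d8_canonical_py patch =
      pvPyMin patch
        [pvRotate90A patch, pvRotate180A patch, pvRotate270A patch,
         pvFlipHA patch, pvFlipVA patch, pvFlipDiagMainA patch, pvFlipDiagAntiA patch] := by
  rw [d8_canonical_py, if_neg h]

-- main theorem
set_option maxHeartbeats 2000000 in
theorem pvMain (patch : List (List Int)) (hpre : Pre_d8_canonical_py patch) :
    d8_canonical_py patch = d8_canonical_py_alt patch := by
  by_cases hp : patch = []
  · subst hp; rfl
  · by_cases hm : pvRowLen0 patch = 0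
    · -- all rows empty: both sides are []
      rw [pvA_unfold patch hp, pvAlt_mzero patch hp hm]
      exact pvPyMin_nil_of_mem _ _ (by
        simp only [List.mem_cons]
        right; left
        exact (pvRotate90A_of_rowLen0_zero patch hm).symm)
    · -- main rectangular case, n > 0 and m > 0
      set n := patch.length with hn
      set m := pvRowLen0 patch with hmdef
      have hn0 : 0 < n := by
        cases hpatch : patch with
        | nil => exact absurd hpatch hp
        | cons a l => rw [hn, hpatch]; simp
      have hm0 : 0 < m := Nat.pos_of_ne_zero hm
      set f : Nat → Nat → Int := fun i j => (patch.getD i []).getD j 0 with hf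
      have hg : patch = pvMk n m f := pvRect_decomp patch hpre
      -- B's coordinate-mapped grids coincide with A's eight transforms
      have hv0 : pvMk n m (fun i j => pvValB patch n m 0 i j) = patch := by
        conv_rhs => rw [hg]
        rfl
      have hv2 : pvMk n m (fun i j => pvValB patch n m 2 i j) = pvRotate180A patch := by
        have a1 : pvRotate90A patch = pvMk m n (fun i j => f (n - 1 - j) i) := by
          rw [hg]; exact pvRotate90A_mk n m f hn0
        rw [pvRotate180A, a1, pvRotate90A_mk m n _ hm0]
        rfl
      have hv4 : pvMk n m (fun i j => pvValB patch n m 4 i j) = pvFlipHA patch := by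
        conv_rhs => rw [hg]
        rw [pvFlipHA_mk n m f]
        rfl
      have hv5 : pvMk n m (fun i j => pvValB patch n m 5 i j) = pvFlipVA patch := by
        rw [pvFlipVA]
        conv_rhs => rw [hg]
        rw [pvReverse_mk n m f]
        rfl
      have hv1 : pvMk m n (fun i j => pvValB patch n m 1 i j) = pvRotate90A patch := by
        conv_rhs => rw [hg]
        rw [pvRotate90A_mk n m f hn0]
        rfl
      have hv3 : pvMk m n (fun i j => pvValB patch n m 3 i j) = pvRotate270A patch := by
        conv_rhs => rw [hg]
        rw [pvRotate270A_mk n m f hn0]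
        rfl
      have hv6 : pvMk m n (fun i j => pvValB patch n m 6 i j) = pvFlipDiagMainA patch := by
        conv_rhs => rw [hg]
        rw [pvFlipDiagMainA_mk n m f hn0]
        rfl
      have hv7 : pvMk m n (fun i j => pvValB patch n m 7 i j) = pvFlipDiagAntiA patch := by
        have a4 : pvFlipHA patch = pvMk n m (fun i j => f i (m - 1 - j)) := by
          conv_lhs => rw [hg]
          exact pvFlipHA_mk n m f
        rw [pvFlipDiagAntiA, a4, pvRotate90A_mk n m _ hn0]
        rfl
      -- elim results
      obtain ⟨hk1mem, hk1le⟩ := pvElim_spec patch n m [0, 2, 4, 5] n m (by simp)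
      obtain ⟨hk2mem, hk2le⟩ := pvElim_spec patch n m [1, 3, 6, 7] m n (by simp)
      set k1 := pvElim patch n m [0, 2, 4, 5] n m with hk1
      set k2 := pvElim patch n m [1, 3, 6, 7] m n with hk2
      set t1 := pvMk n m (fun i j => pvValB patch n m k1 i j) with ht1
      set t2 := pvMk m n (fun i j => pvValB patch n m k2 i j) with ht2
      have halt : d8_canonical_py_alt patch = if t2 < t1 then t2 else t1 := by
        rw [d8_canonical_py_alt, if_neg hp]
        rfl
      set R := if t2 < t1 then t2 else t1 with hR
      have hRt1 : R ≤ t1 := by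
        rw [hR]; split
        · exact le_of_lt ‹t2 < t1›
        · exact le_refl t1
      have hRt2 : R ≤ t2 := by
        rw [hR]; split
        · exact le_refl t2
        · exact le_of_not_gt ‹¬ t2 < t1›
      -- the A-side list of eight grids
      set L8 : List (List (List Int)) :=
        [patch, pvRotate90A patch, pvRotate180A patch, pvRotate270A patch,
         pvFlipHA patch, pvFlipVA patch, pvFlipDiagMainA patch, pvFlipDiagAntiA patch] with hL8
      -- R is ≤ every member of L8
      have hRle : ∀ t ∈ L8, R ≤ t := by
        intro t ht
        rw [hL8] at ht
        simp only [List.mem_cons, List.not_mem_nil, or_false] at ht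
        rcases ht with rfl | rfl | rfl | rfl | rfl | rfl | rfl | rfl
        · exact le_trans hRt1 (hv0 ▸ hk1le 0 (by simp))
        · exact le_trans hRt2 (hv1 ▸ hk2le 1 (by simp))
        · exact le_trans hRt1 (hv2 ▸ hk1le 2 (by simp))
        · exact le_trans hRt2 (hv3 ▸ hk2le 3 (by simp))
        · exact le_trans hRt1 (hv4 ▸ hk1le 4 (by simp))
        · exact le_trans hRt1 (hv5 ▸ hk1le 5 (by simp))
        · exact le_trans hRt2 (hv6 ▸ hk2le 6 (by simp))
        · exact le_trans hRt2 (hv7 ▸ hk2le 7 (by simp))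
      -- R is a member of L8
      have hRmem : R ∈ L8 := by
        have ht1mem : t1 ∈ L8 := by
          simp only [List.mem_cons, List.not_mem_nil, or_false] at hk1mem
          rcases hk1mem with hk | hk | hk | hk
          · rw [ht1, hk, hv0, hL8]; simp
          · rw [ht1, hk, hv2, hL8]; simp
          · rw [ht1, hk, hv4, hL8]; simp
          · rw [ht1, hk, hv5, hL8]; simp
        have ht2mem : t2 ∈ L8 := by
          simp only [List.mem_cons, List.not_mem_nil, or_false] at hk2mem
          rcases hk2mem with hk | hk | hk | hk
          · rw [ht2, hk, hv1, hL8]; simp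
          · rw [ht2, hk, hv3, hL8]; simp
          · rw [ht2, hk, hv6, hL8]; simp
          · rw [ht2, hk, hv7, hL8]; simp
        rw [hR]; split
        · exact ht2mem
        · exact ht1mem
      -- A's result is pvPyMin over L8, which equals R by antisymmetry
      rw [pvA_unfold patch hp, halt]
      refine le_antisymm ?_ ?_
      · exact pvPyMin_le patch _ R hRmem
      · exact hRle _ (pvPyMin_mem patch _)

-- ===== VERDICT (by name: the statement is the Claim_ definition above) =====
theorem d8_canonical_py_spec : Claim_equal_d8_canonical_py := by
  intro patch _ hpre
  unfold Spec_d8_canonical_py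
  exact pvMain patch hpre
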